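-- pv_equiv track=rewrite | github.com/hoodinformatik/OpenThreat | backend/services/nvd_complete_service.py | _parse_cpe
-- ===== SOURCE A (Python) =====
-- from typing import Any, Dict, List, Optional
--
-- def _parse_cpe(cpe_list: List[str]) -> Dict[str, set]:
--     """
--     Parse CPE URIs to extract vendor and product names.
--
--     CPE format: cpe:2.3:a:vendor:product:version:...
--
--     Args:
--         cpe_list: List of CPE URIs
--
--     Returns:
--         Dict mapping vendor names to sets of product names
--     """
--     vendors_products = {}
--
--     for cpe in cpe_list:
--         parts = cpe.split(":")
--         if len(parts) >= 5:
--             vendor = parts[3].replace("_", " ").title()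
--             product = parts[4].replace("_", " ").title()
--
--             if vendor not in vendors_products:
--                 vendors_products[vendor] = set()
--             vendors_products[vendor].add(product)
--
--     return vendors_products
-- ===== SOURCE B (Python) =====
-- def _pair(cpe):
--     parts = cpe.split(":")
--     if len(parts) >= 5:
--         return (parts[3].replace("_", " ").title(),
--                 parts[4].replace("_", " ").title())
--     return None
--
--
-- def _parse_cpe(cpe_list):
--     pairs = [pr for pr in map(_pair, cpe_list) if pr is not None]
--     vendors = dict.fromkeys(v for v, _ in pairs)
--     return {v: {p for w, p in pairs if w == v} for v in vendors}
-- ===== Notes on version B (the rewrite author's own statement) =====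
-- stated objective: alternative
-- what changed: Replaces the incremental dict-of-sets accumulation (membership test + set.add per element) by a three-stage pipeline: extract a flat (vendor, product) pair list, dedupe vendors by first occurrence, then build each vendor's product set by a comprehension over the pair list.
import Mathlib
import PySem

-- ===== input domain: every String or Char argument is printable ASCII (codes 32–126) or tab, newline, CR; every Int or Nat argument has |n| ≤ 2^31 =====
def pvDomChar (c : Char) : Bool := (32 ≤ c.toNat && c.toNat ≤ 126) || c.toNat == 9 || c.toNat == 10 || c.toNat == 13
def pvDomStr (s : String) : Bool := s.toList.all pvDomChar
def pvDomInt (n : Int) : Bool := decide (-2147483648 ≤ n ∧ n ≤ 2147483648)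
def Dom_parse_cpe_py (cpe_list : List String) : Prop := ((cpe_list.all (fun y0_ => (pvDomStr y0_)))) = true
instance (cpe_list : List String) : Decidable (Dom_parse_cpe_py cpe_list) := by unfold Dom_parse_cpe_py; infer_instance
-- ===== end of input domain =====

-- B replaces A's incremental dict-of-sets accumulation by a pipeline: flat (vendor, product)
-- pair list, vendors deduped by first occurrence, product sets gathered per vendor (alternative
-- decomposition, same results; output compared as a dict of sets).

-- ===== PORT A =====
-- str.title() ported by hand (no PySem primitive): exact on the ASCII domain, where the
-- cased characters are exactly the ASCII letters (Char.isAlpha).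
def pyTitleAux : Bool → List Char → List Char
  | _, [] => []
  | prev, c :: rest =>
    (if c.isAlpha then (if prev then c.toLower else c.toUpper) else c) :: pyTitleAux c.isAlpha rest

def pyTitle (s : String) : String := String.ofList (pyTitleAux false s.toList)

def parse_cpe_py (cpe_list : List String) : List (String × List String) :=
  (cpe_list.foldl
    (fun (d : PySem.Dict String (PySem.Set String)) cpe =>
      let parts := (PySem.Str.split? cpe ":").getD []
      if parts.length ≥ 5 then
        -- parts[3] / parts[4] are in range because parts.length ≥ 5, so pyGetD is exact here
        let vendor := pyTitle (PySem.Str.replace (PySem.List.pyGetD parts 3 "") "_" " ")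
        let product := pyTitle (PySem.Str.replace (PySem.List.pyGetD parts 4 "") "_" " ")
        let d1 := if d.contains vendor then d else d.insert vendor PySem.Set.empty
        d1.insert vendor (PySem.Set.add (d1.getD vendor PySem.Set.empty) product)
      else d)
    PySem.Dict.empty).items

-- ===== PORT B =====
def pairOf (cpe : String) : Option (String × String) :=
  let parts := (PySem.Str.split? cpe ":").getD []
  if parts.length ≥ 5 then
    some (pyTitle (PySem.Str.replace (PySem.List.pyGetD parts 3 "") "_" " "),
          pyTitle (PySem.Str.replace (PySem.List.pyGetD parts 4 "") "_" " "))
  else none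

def parse_cpe_py_alt (cpe_list : List String) : List (String × List String) :=
  let pairs := (cpe_list.map pairOf).filterMap id
  let vendors := PySem.List.dedup (pairs.map Prod.fst)
  vendors.map (fun v => (v, PySem.Set.ofList ((pairs.filter (fun pr => pr.1 == v)).map Prod.snd)))

-- ===== PRECONDITION & SPEC =====
def Spec_parse_cpe_py (cpe_list : List String) (out : List (String × List String)) : Prop := out = parse_cpe_py_alt cpe_list
instance (cpe_list : List String) (out : List (String × List String)) : Decidable (Spec_parse_cpe_py cpe_list out) := by unfold Spec_parse_cpe_py; infer_instance

-- ===== CLAIM (what is proved, stated in full; the proofs are below) =====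
def Claim_equal_parse_cpe_py : Prop := ∀ (cpe_list : List String), Dom_parse_cpe_py cpe_list → Spec_parse_cpe_py cpe_list (parse_cpe_py cpe_list)

-- ===== LEMMAS AND PROOFS =====

-- A's loop body, applied to one (vendor, product) pair
def aStep (d : PySem.Dict String (PySem.Set String)) (vp : String × String) :
    PySem.Dict String (PySem.Set String) :=
  let d1 := if d.contains vp.1 then d else d.insert vp.1 PySem.Set.empty
  d1.insert vp.1 (PySem.Set.add (d1.getD vp.1 PySem.Set.empty) vp.2)

-- A's fold over the strings is the fold of aStep over B's pair list
theorem fold_eq_fold_pairs (l : List String) (d : PySem.Dict String (PySem.Set String)) :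
    l.foldl
      (fun (d : PySem.Dict String (PySem.Set String)) cpe =>
        let parts := (PySem.Str.split? cpe ":").getD []
        if parts.length ≥ 5 then
          let vendor := pyTitle (PySem.Str.replace (PySem.List.pyGetD parts 3 "") "_" " ")
          let product := pyTitle (PySem.Str.replace (PySem.List.pyGetD parts 4 "") "_" " ")
          let d1 := if d.contains vendor then d else d.insert vendor PySem.Set.empty
          d1.insert vendor (PySem.Set.add (d1.getD vendor PySem.Set.empty) product)
        else d)
      d
    = ((l.map pairOf).filterMap id).foldl aStep d := by
  induction l generalizing d with
  | nil => rfl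
  | cons cpe rest ih =>
    simp only [List.foldl_cons, List.map_cons, List.filterMap_cons]
    by_cases h : ((PySem.Str.split? cpe ":").getD []).length ≥ 5
    · have hp : pairOf cpe
          = some (pyTitle (PySem.Str.replace (PySem.List.pyGetD ((PySem.Str.split? cpe ":").getD []) 3 "") "_" " "),
                  pyTitle (PySem.Str.replace (PySem.List.pyGetD ((PySem.Str.split? cpe ":").getD []) 4 "") "_" " ")) := by
        simp [pairOf, h]
      simp only [hp, id_eq, List.foldl_cons]
      rw [ih]
      congr 1
      simp [h, aStep]
    · have hp : pairOf cpe = none := by simp [pairOf, h]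
      simp only [hp, id_eq]
      rw [ih]
      congr 1
      simp [h]

theorem getD_aStep (d : PySem.Dict String (PySem.Set String)) (vp : String × String) (c : String) :
    (aStep d vp).getD c PySem.Set.empty
      = if c = vp.1 then PySem.Set.add (d.getD vp.1 PySem.Set.empty) vp.2
        else d.getD c PySem.Set.empty := by
  unfold aStep
  by_cases hc : d.contains vp.1
  · simp [hc, PySem.Dict.getD_insert]
  · simp only [hc, Bool.false_eq_true, if_false]
    rw [PySem.Dict.getD_insert, PySem.Dict.getD_insert, PySem.Dict.getD_insert]
    by_cases h : c = vp.1
    · simp [h, PySem.Set.empty,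
             PySem.Dict.getD_of_not_contains d ([] : PySem.Set String) (by simpa using hc)]
    · simp [h]

theorem getD_fold_aStep (l : List (String × String)) (d : PySem.Dict String (PySem.Set String))
    (c : String) :
    (l.foldl aStep d).getD c PySem.Set.empty
      = PySem.Set.update (d.getD c PySem.Set.empty)
          ((l.filter (fun pr => pr.1 == c)).map Prod.snd) := by
  induction l generalizing d with
  | nil => simp [PySem.Set.update]
  | cons vp rest ih =>
    simp only [List.foldl_cons, ih, getD_aStep, List.filter_cons]
    by_cases h : vp.1 = c
    · simp [h, PySem.Set.update]
    · have h' : ¬ c = vp.1 := fun hh => h hh.symm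
      simp [h, h', PySem.Set.update]

theorem keys_aStep (d : PySem.Dict String (PySem.Set String)) (vp : String × String) :
    (aStep d vp).keys = PySem.Set.add d.keys vp.1 := by
  unfold aStep
  by_cases hc : d.contains vp.1
  · have hmem : vp.1 ∈ d.keys := (PySem.Dict.contains_iff_mem_keys d vp.1).mp hc
    rw [if_pos hc, PySem.Dict.keys_insert_of_contains d _ hc]
    simp [PySem.Set.add, PySem.Set.contains, hmem]
  · have hmem : vp.1 ∉ d.keys := fun hm => hc ((PySem.Dict.contains_iff_mem_keys d vp.1).mpr hm)
    rw [if_neg hc,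
        PySem.Dict.keys_insert_of_contains _ _ (PySem.Dict.contains_insert_self _ _ _),
        PySem.Dict.keys_insert_of_not_contains d _ (by simpa using hc)]
    simp [PySem.Set.add, PySem.Set.contains, hmem]

theorem keys_fold_aStep (l : List (String × String)) (d : PySem.Dict String (PySem.Set String)) :
    (l.foldl aStep d).keys = PySem.Set.update d.keys (l.map Prod.fst) := by
  induction l generalizing d with
  | nil => simp [PySem.Set.update]
  | cons vp rest ih =>
    simp [List.foldl_cons, ih, keys_aStep, PySem.Set.update]

theorem set_update_nil (xs : List String) :
    PySem.Set.update ([] : List String) xs = PySem.Set.ofList xs := by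
  simp [PySem.Set.update, PySem.Set.ofList_eq_foldl]

theorem nodup_keys_fold_aStep (l : List (String × String)) :
    ((l.foldl aStep PySem.Dict.empty).keys).Nodup := by
  rw [keys_fold_aStep, PySem.Dict.keys_empty, set_update_nil]
  exact PySem.Set.nodup_ofList _

theorem items_fold_aStep (l : List (String × String)) :
    (l.foldl aStep PySem.Dict.empty).items
      = (PySem.Set.ofList (l.map Prod.fst)).map
          (fun v => (v, PySem.Set.ofList ((l.filter (fun pr => pr.1 == v)).map Prod.snd))) := by
  rw [PySem.Dict.items_eq_map_keys _ (nodup_keys_fold_aStep l) PySem.Set.empty,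
      keys_fold_aStep, PySem.Dict.keys_empty, set_update_nil]
  refine List.map_congr_left (fun v _ => ?_)
  rw [getD_fold_aStep, PySem.Dict.getD_empty]
  rw [show (PySem.Set.empty : PySem.Set String) = [] from rfl, set_update_nil]


-- ===== VERDICT (by name: the statement is the Claim_ definition above) =====
theorem parse_cpe_py_spec : Claim_equal_parse_cpe_py := by
  intro cpe_list _
  unfold Spec_parse_cpe_py parse_cpe_py parse_cpe_py_alt
  rw [fold_eq_fold_pairs, items_fold_aStep]
  simp [PySem.List.dedup_eq_ofList]
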